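-- pv_equiv track=rewrite | github.com/ezquire/python-challenges | lowestCommon.py | lowestCommon2
-- ===== SOURCE A (Python) =====
-- def lowestCommon2(array):
--     if len(array) == 0:
--         return None
--     if len(array[0]) == 0:
--         return None
--     common = set(array[0])
--     for i in range(1, len(array)):
--         if len(array[i]) == 0:
--             return None
--         common = common.intersection(set(array[i]))
--     smallest = float("inf")
--     for num in common:
--         if num < smallest:
--             smallest = num
--     return smallest if smallest != float("inf") else None
-- ===== SOURCE B (Python) =====
-- def lowestCommon2(array):
--     if not array:
--         return None
--     counts = {}
--     for sub in array:
--         if not sub: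
--             return None
--         for v in set(sub):
--             counts[v] = counts.get(v, 0) + 1
--     candidates = [v for v, c in counts.items() if c == len(array)]
--     return min(candidates) if candidates else None
-- ===== Notes on version B (the rewrite author's own statement) =====
-- stated objective: alternative
-- what changed: Replaces A's running set-intersection fold followed by a manual min loop with a single pass that builds a value-to-count histogram over per-subarray distinct values, then filters for count == len(array) and takes min.
import Mathlib
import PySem

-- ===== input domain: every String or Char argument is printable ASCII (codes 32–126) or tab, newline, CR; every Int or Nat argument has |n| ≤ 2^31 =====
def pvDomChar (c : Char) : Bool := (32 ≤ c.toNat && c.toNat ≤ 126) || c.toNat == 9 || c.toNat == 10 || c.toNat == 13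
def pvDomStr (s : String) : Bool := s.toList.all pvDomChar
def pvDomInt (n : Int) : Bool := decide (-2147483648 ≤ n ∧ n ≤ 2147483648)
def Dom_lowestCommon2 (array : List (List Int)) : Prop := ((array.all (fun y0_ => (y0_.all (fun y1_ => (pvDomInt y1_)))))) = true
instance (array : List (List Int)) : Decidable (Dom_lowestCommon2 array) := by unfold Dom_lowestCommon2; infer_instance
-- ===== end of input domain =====

-- B replaces A's running set-intersection fold by a value→count histogram with a final
-- filter-for-count==len + min pass (alternative decomposition, same asymptotic cost).

-- ===== PORT A =====
-- the 'for i in range(1, len(array))' loop: early-return None on an empty subarray,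
-- otherwise intersect the running set
def lcInterLoop : List (List Int) → PySem.Set Int → Option (PySem.Set Int)
  | [], common => some common
  | sub :: rest, common =>
      if sub.length = 0 then none
      else lcInterLoop rest (common.inter (PySem.Set.ofList sub))

-- one step of the 'if num < smallest' loop; none plays float("inf")
def lcMinStep (s : Option Int) (num : Int) : Option Int :=
  match s with
  | none => some num
  | some m => if num < m then some num else s

def lowestCommon2 (array : List (List Int)) : Option Int :=
  match array with
  | [] => none
  | a0 :: rest =>
    if a0.length = 0 then none
    else
      match lcInterLoop rest (PySem.Set.ofList a0) with
      | none => none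
      | some common => common.foldl lcMinStep none

-- ===== PORT B =====
-- the 'for sub in array' loop of Source B: early-return None on an empty subarray,
-- otherwise bump counts[v] for each v in set(sub)
def lcCountLoop : List (List Int) → PySem.Dict Int Int → Option (PySem.Dict Int Int)
  | [], d => some d
  | sub :: rest, d =>
      if sub = [] then none
      else lcCountLoop rest ((PySem.Set.ofList sub).foldl
             (fun d v => d.insert v (d.getD v 0 + 1)) d)

def lowestCommon2_alt (array : List (List Int)) : Option Int :=
  if array = [] then none
  else
    match lcCountLoop array PySem.Dict.empty with
    | none => none
    | some counts =>
      PySem.List.min?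
        ((counts.items.filter (fun p => p.2 == (array.length : Int))).map (·.1))
        (fun v => v)

-- ===== PRECONDITION & SPEC =====
def Spec_lowestCommon2 (array : List (List Int)) (out : Option Int) : Prop := out = lowestCommon2_alt array
instance (array : List (List Int)) (out : Option Int) : Decidable (Spec_lowestCommon2 array out) := by unfold Spec_lowestCommon2; infer_instance

-- ===== CLAIM (what is proved, stated in full; the proofs are below) =====
def Claim_equal_lowestCommon2 : Prop := ∀ (array : List (List Int)), Dom_lowestCommon2 array → Spec_lowestCommon2 array (lowestCommon2 array)

-- ===== LEMMAS AND PROOFS =====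

-- A-side: the intersection loop returns none exactly when some subarray is empty
theorem lcInterLoop_eq_none_iff (rest : List (List Int)) (c : PySem.Set Int) :
    lcInterLoop rest c = none ↔ ∃ sub ∈ rest, sub = [] := by
  induction rest generalizing c with
  | nil => simp [lcInterLoop]
  | cons sub t ih =>
    by_cases h : sub.length = 0
    · have : sub = [] := List.length_eq_zero_iff.mp h
      simp [lcInterLoop, this]
    · have : sub ≠ [] := by
        intro he; exact h (by simp [he])
      simp [lcInterLoop, h, ih, this]

-- A-side: membership in the final intersection set
theorem lcInterLoop_mem (rest : List (List Int)) (c : PySem.Set Int)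
    (common : PySem.Set Int) (h : lcInterLoop rest c = some common) (x : Int) :
    x ∈ common ↔ x ∈ c ∧ ∀ sub ∈ rest, x ∈ sub := by
  induction rest generalizing c with
  | nil =>
    simp [lcInterLoop] at h
    simp [h.symm]
  | cons sub t ih =>
    by_cases hs : sub.length = 0
    · simp [lcInterLoop, hs] at h
    · simp only [lcInterLoop, if_neg hs] at h
      rw [ih _ h]
      simp [PySem.Set.mem_inter, PySem.Set.mem_ofList]
      tauto

-- B-side: the counting loop returns none exactly when some subarray is empty
theorem lcCountLoop_eq_none_iff (l : List (List Int)) (d : PySem.Dict Int Int) :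
    lcCountLoop l d = none ↔ ∃ sub ∈ l, sub = [] := by
  induction l generalizing d with
  | nil => simp [lcCountLoop]
  | cons sub t ih =>
    by_cases h : sub = []
    · simp [lcCountLoop, h]
    · simp [lcCountLoop, h, ih]

-- count of an element in a deduplicated list is its 0/1 membership indicator
theorem count_ofList (sub : List Int) (v : Int) :
    List.count v (PySem.Set.ofList sub) = if v ∈ sub then 1 else 0 := by
  by_cases h : v ∈ sub
  · have hm : v ∈ PySem.Set.ofList sub := (PySem.Set.mem_ofList sub v).mpr h
    have hn : (PySem.Set.ofList sub).Nodup := PySem.Set.nodup_ofList sub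
    have h1 : List.count v (PySem.Set.ofList sub) = 1 :=
      List.count_eq_one_of_mem hn hm
    simp [h, h1]
  · have hm : v ∉ PySem.Set.ofList sub := fun hc => h ((PySem.Set.mem_ofList sub v).mp hc)
    simp [h, List.count_eq_zero_of_not_mem hm]

-- B-side: the final histogram counts, per value, the subarrays containing it
theorem lcCountLoop_getD (l : List (List Int)) (d : PySem.Dict Int Int)
    (counts : PySem.Dict Int Int) (h : lcCountLoop l d = some counts) (v : Int) :
    counts.getD v 0 = d.getD v 0 + (l.countP (fun sub => decide (v ∈ sub)) : Int) := by
  induction l generalizing d with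
  | nil =>
    simp [lcCountLoop] at h
    simp [h.symm]
  | cons sub t ih =>
    by_cases hs : sub = []
    · simp [lcCountLoop, hs] at h
    · simp only [lcCountLoop, if_neg hs] at h
      rw [ih _ h, PySem.Dict.getD_foldl_insert_add_one, count_ofList]
      by_cases hv : v ∈ sub <;> simp [hv] <;> ring

-- B-side: the final histogram's keys stay duplicate-free
theorem lcCountLoop_nodup (l : List (List Int)) (d : PySem.Dict Int Int)
    (counts : PySem.Dict Int Int) (h : lcCountLoop l d = some counts)
    (hd : d.keys.Nodup) : counts.keys.Nodup := by
  induction l generalizing d with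
  | nil => simp [lcCountLoop] at h; exact h ▸ hd
  | cons sub t ih =>
    by_cases hs : sub = []
    · simp [lcCountLoop, hs] at h
    · simp only [lcCountLoop, if_neg hs] at h
      exact ih _ h (PySem.Dict.nodup_keys_foldl_insert _ _ _ hd)

-- the min-accumulating fold, started at 'some a', yields the minimum of a and the list
theorem foldMin_some_spec (l : List Int) (a : Int) :
    ∃ m, List.foldl lcMinStep (some a) l = some m ∧ (m = a ∨ m ∈ l) ∧ m ≤ a ∧ ∀ x ∈ l, m ≤ x := by
  induction l generalizing a with
  | nil => exact ⟨a, rfl, Or.inl rfl, le_refl a, by simp⟩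
  | cons x t ih =>
    by_cases hx : x < a
    · obtain ⟨m, h1, h2, h3, h4⟩ := ih x
      refine ⟨m, ?_, ?_, ?_, ?_⟩
      · simp [List.foldl_cons, lcMinStep, hx, h1]
      · rcases h2 with h | h
        · exact Or.inr (by simp [h])
        · exact Or.inr (by simp [h])
      · omega
      · intro y hy
        rcases List.mem_cons.mp hy with h | h
        · omega
        · exact h4 y h
    · obtain ⟨m, h1, h2, h3, h4⟩ := ih a
      refine ⟨m, ?_, ?_, h3, ?_⟩
      · simp [List.foldl_cons, lcMinStep, hx, h1]
      · tauto
      · intro y hy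
        rcases List.mem_cons.mp hy with h | h
        · omega
        · exact h4 y h

-- lists with the same members have the same manual-fold / min? minimum
theorem foldMin_eq_min? (l1 l2 : List Int)
    (hmem : ∀ x, x ∈ l1 ↔ x ∈ l2) :
    List.foldl lcMinStep none l1 = PySem.List.min? l2 (fun v => v) := by
  cases l1 with
  | nil =>
    have h2 : l2 = [] := by
      cases l2 with
      | nil => rfl
      | cons y t => exact absurd ((hmem y).mpr (by simp)) (by simp)
    subst h2
    exact ((PySem.List.min?_eq_none_iff [] (fun v => v)).mpr rfl).symm
  | cons x t =>
    obtain ⟨m, h1, h2, h3, h4⟩ := foldMin_some_spec t x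
    have hml1 : m ∈ x :: t := by
      rcases h2 with h | h
      · simp [h]
      · simp [h]
    have hfold : List.foldl lcMinStep none (x :: t) = some m := by
      simp [List.foldl_cons, lcMinStep, h1]
    have hx2 : x ∈ l2 := (hmem x).mp (by simp)
    cases hm2 : PySem.List.min? l2 (fun v => v) with
    | none =>
      rw [PySem.List.min?_eq_none_iff] at hm2
      rw [hm2] at hx2; simp at hx2
    | some m2 =>
      have hm2mem : m2 ∈ x :: t := (hmem m2).mpr (PySem.List.min?_mem hm2)
      have hle1 : m ≤ m2 := by
        rcases List.mem_cons.mp hm2mem with h | h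
        · omega
        · exact h4 _ h
      have hle2 : m2 ≤ m := PySem.List.min?_isMin hm2 m ((hmem m).mp hml1)
      rw [hfold]
      exact congrArg some (le_antisymm hle1 hle2)

-- getD in terms of get? (unfolds the PySem definition)
theorem getD_eq_some_iff (d : PySem.Dict Int Int) (v n : Int) (hn : n ≠ 0) :
    d.getD v 0 = n ↔ d.get? v = some n := by
  cases h : d.get? v with
  | none => simp [PySem.Dict.getD, h, Ne.symm hn]
  | some c => simp [PySem.Dict.getD, h]

-- ===== VERDICT (by name: the statement is the Claim_ definition above) =====
theorem lowestCommon2_spec : Claim_equal_lowestCommon2 := by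
  intro array _
  unfold Spec_lowestCommon2
  match harr : array with
  | [] => simp [lowestCommon2, lowestCommon2_alt]
  | a0 :: rest =>
    by_cases h0 : a0.length = 0
    · have ha0 : a0 = [] := List.length_eq_zero_iff.mp h0
      have : lcCountLoop (a0 :: rest) PySem.Dict.empty = none := by
        simp [lcCountLoop, ha0]
      simp [lowestCommon2, lowestCommon2_alt, h0, this]
    · have ha0 : a0 ≠ [] := fun he => h0 (by simp [he])
      cases hA : lcInterLoop rest (PySem.Set.ofList a0) with
      | none =>
        -- some subarray of rest is empty: B's loop also returns none
        have hex : ∃ sub ∈ rest, sub = [] := (lcInterLoop_eq_none_iff _ _).mp hA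
        have hB : lcCountLoop (a0 :: rest) PySem.Dict.empty = none := by
          rw [lcCountLoop_eq_none_iff]
          obtain ⟨sub, hs1, hs2⟩ := hex
          exact ⟨sub, by simp [hs1], hs2⟩
        simp [lowestCommon2, lowestCommon2_alt, h0, hA, hB]
      | some common =>
        have hnoempty : ∀ sub ∈ (a0 :: rest), sub ≠ [] := by
          intro sub hs
          rcases List.mem_cons.mp hs with h | h
          · exact h ▸ ha0
          · intro he
            have : lcInterLoop rest (PySem.Set.ofList a0) = none :=
              (lcInterLoop_eq_none_iff _ _).mpr ⟨sub, h, he⟩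
            rw [hA] at this; cases this
        cases hB : lcCountLoop (a0 :: rest) PySem.Dict.empty with
        | none =>
          obtain ⟨sub, hs1, hs2⟩ := (lcCountLoop_eq_none_iff _ _).mp hB
          exact absurd hs2 (hnoempty sub hs1)
        | some counts =>
          -- both sides: min over lists with identical membership
          have hnodup : counts.keys.Nodup :=
            lcCountLoop_nodup _ _ _ hB (by simp [PySem.Dict.empty, PySem.Dict.keys])
          have hgetD : ∀ v : Int, counts.getD v 0 =
              ((a0 :: rest).countP (fun sub => decide (v ∈ sub)) : Int) := by
            intro v
            rw [lcCountLoop_getD _ _ _ hB v]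
            simp [PySem.Dict.getD, PySem.Dict.empty, PySem.Dict.get?]
          have hlen : ((a0 :: rest).length : Int) ≠ 0 :=
            Int.natCast_ne_zero.mpr (by simp)
          have hmem : ∀ x, x ∈ common ↔
              x ∈ (counts.items.filter (fun p => p.2 == ((a0 :: rest).length : Int))).map
                    (Prod.fst) := by
            intro x
            rw [lcInterLoop_mem _ _ _ hA x, PySem.Set.mem_ofList]
            constructor
            · rintro ⟨hx0, hxr⟩
              have hall : ∀ sub ∈ (a0 :: rest), x ∈ sub := by
                intro sub hs
                rcases List.mem_cons.mp hs with h | h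
                · exact h ▸ hx0
                · exact hxr sub h
              have hcount : counts.getD x 0 = ((a0 :: rest).length : Int) := by
                rw [hgetD x]
                congr 1
                exact_mod_cast List.countP_eq_length.mpr (fun a ha => by simp [hall a ha])
              have hget : counts.get? x = some ((a0 :: rest).length : Int) :=
                (getD_eq_some_iff _ _ _ hlen).mp hcount
              have hit : (x, ((a0 :: rest).length : Int)) ∈ counts.items :=
                (PySem.Dict.get?_eq_some_iff_mem_items _ _ _ hnodup).mp hget
              simp only [List.mem_map, List.mem_filter]
              exact ⟨(x, ((a0 :: rest).length : Int)), ⟨hit, by simp⟩, rfl⟩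
            · intro hx
              simp only [List.mem_map, List.mem_filter] at hx
              obtain ⟨⟨k, c⟩, ⟨hit, hc⟩, hk⟩ := hx
              simp only [beq_iff_eq] at hc
              simp only at hk
              subst hc
              rw [hk] at hit
              have hget : counts.get? x = some ((a0 :: rest).length : Int) :=
                (PySem.Dict.get?_eq_some_iff_mem_items _ _ _ hnodup).mpr hit
              have hcount : counts.getD x 0 = ((a0 :: rest).length : Int) :=
                (getD_eq_some_iff _ _ _ hlen).mpr hget
              rw [hgetD x] at hcount
              have : (a0 :: rest).countP (fun sub => decide (x ∈ sub)) = (a0 :: rest).length := by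
                exact_mod_cast hcount
              have hall := List.countP_eq_length.mp this
              exact ⟨by simpa using hall a0 (by simp), fun sub hs => by simpa using hall sub (by simp [hs])⟩
          have := foldMin_eq_min? common
            ((counts.items.filter (fun p => p.2 == ((a0 :: rest).length : Int))).map (·.1)) hmem
          simp only [lowestCommon2, lowestCommon2_alt, if_neg h0, hA, hB]
          simpa using this
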